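-- pv_equiv track=rewrite | github.com/posl/comment_recommendation | script/split_gen/1_time/zh/102_D/1.py | get_max_min_diff
-- ===== SOURCE A (Python) =====
-- def get_max_min_diff(a):
--     n = len(a)
--     max_diff = 0
--     for i in range(1, n-2):
--         for j in range(i+1, n-1):
--             for k in range(j+1, n):
--                 max_diff = max(max_diff, abs(sum(a[:i]) - sum(a[i:j]) - sum(a[j:k]) + sum(a[k:])))
--     return max_diff
-- ===== SOURCE B (Python) =====
-- def get_max_min_diff(a):
--     n = len(a)
--     P = [0]
--     s = 0
--     for x in a:
--         s += x
--         P.append(s)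
--     best = 0
--     for i in range(1, n - 2):
--         for k in range(i + 2, n):
--             best = max(best, abs(2 * (P[i] - P[k]) + s))
--     return best
-- ===== Notes on version B (the rewrite author's own statement) =====
-- stated objective: faster
-- what changed: Replaced the O(n^3) triple-loop with O(n) slice resummation inside by prefix sums plus the algebraic cancellation of the middle cut point j (the value depends only on i and k), giving a single O(n^2) scan over (i,k) pairs.
import Mathlib
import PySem

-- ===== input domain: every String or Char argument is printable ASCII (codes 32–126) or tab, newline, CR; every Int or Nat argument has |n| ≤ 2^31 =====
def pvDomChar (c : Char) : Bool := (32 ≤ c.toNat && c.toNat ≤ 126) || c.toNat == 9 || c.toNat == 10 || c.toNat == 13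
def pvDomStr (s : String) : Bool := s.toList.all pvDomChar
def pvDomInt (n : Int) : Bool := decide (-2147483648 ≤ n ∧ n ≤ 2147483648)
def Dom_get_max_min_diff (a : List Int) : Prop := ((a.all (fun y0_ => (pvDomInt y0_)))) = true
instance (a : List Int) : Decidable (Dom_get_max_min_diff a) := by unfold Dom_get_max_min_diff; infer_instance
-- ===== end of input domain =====

-- B replaces A's O(n^3)-triples-times-O(n)-resummation search with prefix sums and the
-- algebraic cancellation of the middle cut (the value depends only on i and k), an O(n^2) scan.

-- ===== PORT A =====
def get_max_min_diff (a : List Int) : Int :=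
  let n : Int := a.length
  (PySem.List.pyRange 1 (n - 2) 1).foldl (fun md i =>
    (PySem.List.pyRange (i + 1) (n - 1) 1).foldl (fun md j =>
      (PySem.List.pyRange (j + 1) n 1).foldl (fun md k =>
        max md |(PySem.List.slice a none (some i)).sum
                - (PySem.List.slice a (some i) (some j)).sum
                - (PySem.List.slice a (some j) (some k)).sum
                + (PySem.List.slice a (some k) none).sum|) md) md) 0

-- ===== PORT B =====
def get_max_min_diff_alt (a : List Int) : Int :=
  let n : Int := a.length
  let ps := a.foldl (fun (st : List Int × Int) x => (st.1 ++ [st.2 + x], st.2 + x)) ([0], 0)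
  let P := ps.1
  let s := ps.2
  (PySem.List.pyRange 1 (n - 2) 1).foldl (fun best i =>
    (PySem.List.pyRange (i + 2) n 1).foldl (fun best k =>
      max best |2 * (PySem.List.pyGetD P i 0 - PySem.List.pyGetD P k 0) + s|) best) 0

-- ===== PRECONDITION & SPEC =====
def Spec_get_max_min_diff (a : List Int) (out : Int) : Prop := out = get_max_min_diff_alt a
instance (a : List Int) (out : Int) : Decidable (Spec_get_max_min_diff a out) := by unfold Spec_get_max_min_diff; infer_instance

-- ===== CLAIM (what is proved, stated in full; the proofs are below) =====
def Claim_equal_get_max_min_diff : Prop := ∀ (a : List Int), Dom_get_max_min_diff a → Spec_get_max_min_diff a (get_max_min_diff a)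

-- ===== LEMMAS AND PROOFS =====

-- the common value of one (i,k) cut, as a function of the prefix sums
def pvVal (a : List Int) (i k : Int) : Int :=
  |2 * ((a.take i.toNat).sum - (a.take k.toNat).sum) + a.sum|

-- sum of a drop-take segment in terms of prefix sums
theorem sum_drop_take (a : List Int) (p q : Nat) :
    ((a.drop p).take q).sum = (a.take (p + q)).sum - (a.take p).sum := by
  have h : (a.take (p + q)).sum = (a.take p).sum + ((a.drop p).take q).sum := by
    rw [List.take_add, List.sum_append]
  omega

theorem sum_drop (a : List Int) (p : Nat) :
    (a.drop p).sum = a.sum - (a.take p).sum := by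
  have h : (a.take p).sum + (a.drop p).sum = a.sum := by
    rw [← List.sum_append, List.take_append_drop]
  omega

-- A's inner expression depends only on i and k
theorem sliceExpr_eq (a : List Int) (i j k : Int)
    (hi : 0 ≤ i) (hij : i ≤ j) (hjk : j ≤ k) :
    (PySem.List.slice a none (some i)).sum
      - (PySem.List.slice a (some i) (some j)).sum
      - (PySem.List.slice a (some j) (some k)).sum
      + (PySem.List.slice a (some k) none).sum
    = 2 * ((a.take i.toNat).sum - (a.take k.toNat).sum) + a.sum := by
  have hj : 0 ≤ j := le_trans hi hij
  have hk : 0 ≤ k := le_trans hj hjk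
  rw [PySem.List.slice_to a hi, PySem.List.slice_toNat a hi hj,
      PySem.List.slice_toNat a hj hk, PySem.List.slice_from a hk]
  rw [sum_drop_take, sum_drop_take, sum_drop]
  have h1 : i.toNat + (j.toNat - i.toNat) = j.toNat := by omega
  have h2 : j.toNat + (k.toNat - j.toNat) = k.toNat := by omega
  rw [h1, h2]
  ring

-- generic max-fold machinery
theorem foldl_max_init_le {g : Int → Int} (l : List Int) (md : Int) :
    md ≤ l.foldl (fun m k => max m (g k)) md := by
  induction l generalizing md with
  | nil => simp
  | cons x l ih => exact le_trans (le_max_left _ _) (ih (max md (g x)))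

theorem foldl_max_mem_le {g : Int → Int} (l : List Int) (md k : Int) (hk : k ∈ l) :
    g k ≤ l.foldl (fun m k => max m (g k)) md := by
  induction l generalizing md with
  | nil => simp at hk
  | cons x l ih =>
    rcases List.mem_cons.mp hk with h | h
    · subst h
      exact le_trans (le_max_right md (g k)) (foldl_max_init_le l _)
    · exact ih _ h

theorem foldl_max_const {g : Int → Int} (l : List Int) (md : Int)
    (h : ∀ k ∈ l, g k ≤ md) : l.foldl (fun m k => max m (g k)) md = md := by
  induction l generalizing md with
  | nil => rfl
  | cons x l ih =>
    have hx : max md (g x) = md := max_eq_left (h x (List.mem_cons_self))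
    simp only [List.foldl_cons, hx]
    exact ih md (fun k hk => h k (List.mem_cons_of_mem _ hk))

-- a fold of inner max-folds whose values are all ≤ md is the identity
theorem foldl_inner_stable (g : Int → Int) (n : Int) (l : List Int) (md : Int)
    (h : ∀ j ∈ l, ∀ k ∈ PySem.List.pyRange (j + 1) n 1, g k ≤ md) :
    l.foldl (fun md j => (PySem.List.pyRange (j + 1) n 1).foldl
      (fun m k => max m (g k)) md) md = md := by
  induction l with
  | nil => rfl
  | cons x l ih =>
    simp only [List.foldl_cons]
    rw [foldl_max_const _ md (h x (List.mem_cons_self))]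
    exact ih (fun j hj k hk => h j (List.mem_cons_of_mem _ hj) k hk)

-- collapsing A's j-loop: the j-indexed union of k-ranges is the k-range at j = i+1
theorem middle_collapse (g : Int → Int) (n i md : Int) (h : i + 1 < n - 1) :
    (PySem.List.pyRange (i + 1) (n - 1) 1).foldl (fun md j =>
      (PySem.List.pyRange (j + 1) n 1).foldl (fun m k => max m (g k)) md) md
    = (PySem.List.pyRange (i + 2) n 1).foldl (fun m k => max m (g k)) md := by
  rw [PySem.List.pyRange_one_cons (by omega : i + 1 < n - 1)]
  simp only [List.foldl_cons]
  have hi2 : i + 1 + 1 = i + 2 := by ring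
  rw [hi2]
  set md1 := (PySem.List.pyRange (i + 2) n 1).foldl (fun m k => max m (g k)) md with hmd1
  apply foldl_inner_stable
  intro j hj k hk
  rw [PySem.List.mem_pyRange_one] at hj hk
  have hkmem : k ∈ PySem.List.pyRange (i + 2) n 1 := by
    rw [PySem.List.mem_pyRange_one]; omega
  exact foldl_max_mem_le _ md k hkmem

-- B's prefix-sum list characterised
theorem prefix_fold (l : List Int) (pre : List Int) (s : Int) :
    l.foldl (fun (st : List Int × Int) x => (st.1 ++ [st.2 + x], st.2 + x)) (pre, s)
    = (pre ++ (List.range l.length).map (fun m => s + (l.take (m + 1)).sum), s + l.sum) := by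
  induction l generalizing pre s with
  | nil => simp
  | cons x l ih =>
    simp only [List.foldl_cons]
    rw [ih]
    rw [Prod.mk.injEq]
    refine ⟨?_, ?_⟩
    · rw [List.length_cons, List.range_succ_eq_map]
      simp only [List.map_cons, List.map_map]
      simp [List.append_assoc]
      intro m _
      ring
    · simp; ring

theorem P_get (a : List Int) (i : Int) (h0 : 0 ≤ i) (hn : i ≤ (a.length : Int)) :
    PySem.List.pyGetD ([0] ++ (List.range a.length).map
      (fun m => (a.take (m + 1)).sum) : List Int) i 0 = (a.take i.toNat).sum := by
  have hi : i = (i.toNat : Int) := by omega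
  rw [hi, PySem.List.pyGetD_natCast]
  rcases Nat.eq_zero_or_pos i.toNat with h | h
  · simp [h]
  · obtain ⟨m, hm⟩ : ∃ m, i.toNat = m + 1 := ⟨i.toNat - 1, by omega⟩
    have hmlt : m < a.length := by omega
    rw [hm]
    simp [List.getD, List.getElem?_map, List.getElem?_range hmlt]

-- ===== VERDICT (by name: the statement is the Claim_ definition above) =====
theorem get_max_min_diff_spec : Claim_equal_get_max_min_diff := by
  intro a _
  unfold Spec_get_max_min_diff get_max_min_diff get_max_min_diff_alt
  simp only []
  rw [prefix_fold a [0] 0]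
  simp only [zero_add]
  apply PySem.List.foldl_congr_mem
  intro acc i hi
  rw [PySem.List.mem_pyRange_one] at hi
  -- rewrite A's inner value to pvVal a i k, independent of j
  have hA : ∀ (md : Int), (PySem.List.pyRange (i + 1) ((a.length : Int) - 1) 1).foldl (fun md j =>
      (PySem.List.pyRange (j + 1) (a.length : Int) 1).foldl (fun md k =>
        max md |(PySem.List.slice a none (some i)).sum
                - (PySem.List.slice a (some i) (some j)).sum
                - (PySem.List.slice a (some j) (some k)).sum
                + (PySem.List.slice a (some k) none).sum|) md) md
      = (PySem.List.pyRange (i + 1) ((a.length : Int) - 1) 1).foldl (fun md j =>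
      (PySem.List.pyRange (j + 1) (a.length : Int) 1).foldl (fun md k =>
        max md (pvVal a i k)) md) md := by
    intro md
    apply PySem.List.foldl_congr_mem
    intro acc j hj
    rw [PySem.List.mem_pyRange_one] at hj
    apply PySem.List.foldl_congr_mem
    intro acc2 k hk
    rw [PySem.List.mem_pyRange_one] at hk
    rw [sliceExpr_eq a i j k (by omega) (by omega) (by omega)]
    rfl
  rw [hA, middle_collapse (pvVal a i) (a.length : Int) i acc (by omega)]
  apply PySem.List.foldl_congr_mem
  intro acc2 k hk
  rw [PySem.List.mem_pyRange_one] at hk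
  rw [P_get a i (by omega) (by omega), P_get a k (by omega) (by omega)]
  rfl
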